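-- pv_equiv track=rewrite | github.com/liupengsay/PyIsTheBestLang | algorithm/src/dp/digital_dp.py | count_digit_base2
-- ===== SOURCE A (Python) =====
-- from functools import lru_cache
-- from functools import lru_cache
--
-- def count_digit_base2(num, d):
--
--     # 使用数位DP计算1-num内不含数字d的个数 0<=d<=9
--     @lru_cache(None)
--     def dfs(i: int, is_limit: bool, is_num: bool) -> int:
--         if i == m:
--             return int(is_num)
--
--         res = 0
--         if not is_num:  # 可以跳过当前数位
--             res = dfs(i + 1, False, False)
--         up = int(s[i]) if is_limit else 9
--         for x in range(0 if is_num else 1, up + 1):  # 枚举要填入的数字 d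
--             if x != d:
--                 res += dfs(i + 1, is_limit and x == up, True)
--         return res
--     s = str(num)
--     m = len(s)
--     return dfs(0, True, False)
-- ===== SOURCE B (Python) =====
-- def count_digit_base2(num, d):
--     # Combinatorial counting instead of memoized digit-DP recursion:
--     # count shorter lengths by a closed formula, then one left-to-right scan
--     # of the digits of num for the exact length.
--     if num <= 0:
--         return 0
--     digits = [int(c) for c in str(num)]
--     m = len(digits)
--     lead = allowed_count(1, 10, d)    # leading digits 1..9 that avoid d
--     restc = allowed_count(0, 10, d)   # any digits 0..9 that avoid d
--     total = 0
--     for L in range(1, m):             # all numbers with fewer digits than num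
--         total += lead * restc ** (L - 1)
--     for i, dig in enumerate(digits):  # numbers with exactly m digits, <= num
--         lo = 1 if i == 0 else 0
--         total += allowed_count(lo, dig, d) * restc ** (m - 1 - i)
--         if dig == d:
--             break
--     else:
--         total += 1                    # num itself avoids d
--     return total
--
--
-- def allowed_count(lo, hi, d):
--     n = 0
--     for x in range(lo, hi):
--         if x != d:
--             n += 1
--     return n
-- ===== Notes on version B (the rewrite author's own statement) =====
-- stated objective: alternative
-- what changed: Replaces A's memoized top-down digit-DP recursion (dfs over position/is_limit/is_num states) by direct combinatorial counting: a closed per-length product for all shorter lengths plus one left-to-right scan of num's digits for the exact length.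
import Mathlib
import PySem

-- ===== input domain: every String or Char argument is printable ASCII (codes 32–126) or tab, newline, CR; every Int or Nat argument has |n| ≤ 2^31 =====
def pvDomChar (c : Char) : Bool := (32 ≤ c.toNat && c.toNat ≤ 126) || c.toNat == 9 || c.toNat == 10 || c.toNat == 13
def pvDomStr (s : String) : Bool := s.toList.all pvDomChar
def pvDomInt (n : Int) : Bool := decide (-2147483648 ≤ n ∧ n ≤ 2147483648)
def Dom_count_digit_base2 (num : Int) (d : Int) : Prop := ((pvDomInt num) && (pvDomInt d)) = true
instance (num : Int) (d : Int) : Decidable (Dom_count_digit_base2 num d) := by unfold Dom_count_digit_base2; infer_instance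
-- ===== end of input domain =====

-- B replaces A's memoized digit-DP recursion by direct combinatorial counting (closed
-- per-length products plus one left-to-right scan of the digits); return values agree on all
-- num ≥ 0 (negative num makes A raise ValueError, excluded by Pre_).

-- ===== PORT A =====
-- int(c) for one character c (A's `int(s[i])`); inside Pre_ every s[i] is a decimal digit,
-- the getD 0 default is only reached outside Pre_ (where A raises ValueError).
def pyDigit (c : Char) : Int := (PySem.Int.ofStr? (String.singleton c)).getD 0

-- A's dfs, recursing on the remaining suffix of s (i ↦ the suffix s[i:]).  lru_cache makes each
-- state's value computed once; the recursive call dfs(i+1, is_limit and x == up, True) of the loop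
-- takes only the two values hoisted into `tight`/`free`, which ports that sharing.
def dfsA (d : Int) : List Char → Bool → Bool → Int
  | [], _, is_num => if is_num then 1 else 0
  | c :: rest, is_limit, is_num =>
    let res : Int := if is_num then 0 else dfsA d rest false false
    let up : Int := if is_limit then pyDigit c else 9
    let tight : Int := dfsA d rest true true
    let free : Int := dfsA d rest false true
    (PySem.List.pyRange (if is_num then 0 else 1) (up + 1) 1).foldl
      (fun acc x => if x ≠ d then acc + (if is_limit && decide (x = up) then tight else free) else acc) res

def count_digit_base2 (num : Int) (d : Int) : Int :=
  dfsA d (PySem.Int.toStr num).toList true false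

-- ===== PORT B =====
-- Source B's allowed_count(lo, hi, d): how many x in range(lo, hi) differ from d.
def allowedCount (lo hi d : Int) : Int :=
  (PySem.List.pyRange lo hi 1).foldl (fun n x => if x ≠ d then n + 1 else n) 0

-- Source B's for-loop over enumerate(digits) with break/else, as recursion on the suffix.
def scanB (d restc : Int) (m : Nat) : Nat → List Int → Int
  | _, [] => 1
  | i, dig :: rest =>
    let lo : Int := if i = 0 then 1 else 0
    let add := allowedCount lo dig d * restc ^ (m - 1 - i)
    if dig = d then add else add + scanB d restc m (i + 1) rest

def count_digit_base2_alt (num : Int) (d : Int) : Int :=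
  if num ≤ 0 then 0
  else
    let digits := (PySem.Int.toStr num).toList.map pyDigit
    let m := digits.length
    let lead := allowedCount 1 10 d
    let restc := allowedCount 0 10 d
    let total := (PySem.List.pyRange 1 (m : Int) 1).foldl
      (fun a L => a + lead * restc ^ (L - 1).toNat) 0
    total + scanB d restc m 0 digits

-- ===== PRECONDITION & SPEC =====
-- Pre_ excludes num < 0, on which A raises ValueError (int('-') on the sign character).
def Pre_count_digit_base2 (num : Int) (d : Int) : Prop := 0 ≤ num
instance (num : Int) (d : Int) : Decidable (Pre_count_digit_base2 num d) := by unfold Pre_count_digit_base2; infer_instance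
def pvWitness_count_digit_base2 : Int × Int := (25, 2)

def Spec_count_digit_base2 (num : Int) (d : Int) (out : Int) : Prop := out = count_digit_base2_alt num d
instance (num : Int) (d : Int) (out : Int) : Decidable (Spec_count_digit_base2 num d out) := by unfold Spec_count_digit_base2; infer_instance

-- ===== CLAIM (what is proved, stated in full; the proofs are below) =====
def Claim_equal_count_digit_base2 : Prop := ∀ (num : Int) (d : Int), Dom_count_digit_base2 num d → Pre_count_digit_base2 num d → Spec_count_digit_base2 num d (count_digit_base2 num d)
-- ===== LEMMAS AND PROOFS =====

-- dfsA over value lists: dfsA reads each char once through pyDigit, so it factors through this.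
def dfsV (d : Int) : List Int → Bool → Bool → Int
  | [], _, is_num => if is_num then 1 else 0
  | v :: rest, is_limit, is_num =>
    let res : Int := if is_num then 0 else dfsV d rest false false
    let up : Int := if is_limit then v else 9
    let tight : Int := dfsV d rest true true
    let free : Int := dfsV d rest false true
    (PySem.List.pyRange (if is_num then 0 else 1) (up + 1) 1).foldl
      (fun acc x => if x ≠ d then acc + (if is_limit && decide (x = up) then tight else free) else acc) res

lemma dfsA_eq_dfsV (d : Int) (t : List Char) (l n : Bool) :
    dfsA d t l n = dfsV d (t.map pyDigit) l n := by
  induction t generalizing l n with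
  | nil => rfl
  | cons c rest ih =>
    simp only [dfsA, dfsV, List.map_cons, ih]

-- the most-significant-first digit list of a natural number
def msdigits (n : Nat) : List Nat :=
  if h : n < 10 then [n] else msdigits (n / 10) ++ [n % 10]
decreasing_by exact Nat.div_lt_self (by omega) (by omega)

lemma toDigitsCore_eq (f : Nat) : ∀ (n : Nat) (l : List Char), n < f →
    Nat.toDigitsCore 10 f n l = (msdigits n).map Nat.digitChar ++ l := by
  induction f with
  | zero => intro n l h; omega
  | succ f ih =>
    intro n l h
    rw [Nat.toDigitsCore]
    by_cases h10 : n < 10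
    · have : n / 10 = 0 := Nat.div_eq_of_lt h10
      simp [this, msdigits, h10, Nat.mod_eq_of_lt h10]
    · have hr : n / 10 ≠ 0 := by
        intro h0
        exact h10 (Nat.lt_of_div_eq_zero (by omega) h0)
      have hlt : n / 10 < f := by
        have := Nat.div_lt_self (n := n) (show 0 < n by omega) (show 1 < 10 by omega)
        omega
      rw [if_neg hr, ih (n / 10) _ hlt]
      conv_rhs => rw [msdigits]
      simp [h10, List.map_append]

lemma toChars_eq (n : Nat) :
    PySem.Int.toChars (n : Int) = (msdigits n).map Nat.digitChar := by
  have h0 : ¬ ((n : Int) < 0) := by omega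
  simp only [PySem.Int.toChars, if_neg h0, Int.toNat_natCast, Nat.toDigits]
  rw [toDigitsCore_eq (n + 1) n [] (by omega)]
  simp

lemma msdigits_lt (n : Nat) : ∀ e ∈ msdigits n, e < 10 := by
  induction n using Nat.strong_induction_on with
  | _ n ih =>
    rw [msdigits]
    by_cases h : n < 10
    · simp [h]
    · have hlt : n / 10 < n := Nat.div_lt_self (by omega) (by omega)
      simp only [dif_neg h, List.mem_append, List.mem_singleton]
      rintro e (he | rfl)
      · exact ih _ hlt e he
      · exact Nat.mod_lt _ (by omega)

lemma msdigits_head (n : Nat) (hn : 1 ≤ n) :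
    ∃ e t, msdigits n = e :: t ∧ 1 ≤ e := by
  induction n using Nat.strong_induction_on with
  | _ n ih =>
    rw [msdigits]
    by_cases h : n < 10
    · exact ⟨n, [], by simp [h], hn⟩
    · have hlt : n / 10 < n := Nat.div_lt_self (by omega) (by omega)
      obtain ⟨e, t, het, he⟩ := ih (n / 10) hlt (Nat.one_le_div_iff (by omega) |>.mpr (by omega))
      exact ⟨e, t ++ [n % 10], by simp [h, het], he⟩

lemma pyDigit_digitChar (e : Nat) (h : e < 10) :
    pyDigit (Nat.digitChar e) = (e : Int) := by
  interval_cases e <;> decide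

-- counting shape: a fold adding a constant C on allowed x equals allowedCount * C
lemma foldl_allowed_mul (L : List Int) (d C init : Int) :
    L.foldl (fun acc x => if x ≠ d then acc + C else acc) init
      = init + (L.foldl (fun n x => if x ≠ d then n + 1 else n) 0) * C := by
  induction L generalizing init with
  | nil => simp
  | cons x L ih =>
    simp only [List.foldl_cons]
    rw [ih, PySem.List.foldl_ite_add_one, PySem.List.foldl_ite_add_one]
    by_cases hx : x = d <;> simp [hx] <;> try ring

lemma allowedCount_foldl (lo hi d : Int) :
    (PySem.List.pyRange lo hi 1).foldl (fun n x => if x ≠ d then n + 1 else n) 0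
      = allowedCount lo hi d := rfl

-- L1: unconstrained completion counts restc^len
lemma dfsV_free_num (d : Int) (t : List Int) :
    dfsV d t false true = allowedCount 0 10 d ^ t.length := by
  induction t with
  | nil => simp [dfsV]
  | cons v t ih =>
    simp only [dfsV, Bool.false_and, Bool.false_eq_true, if_false, ih]
    rw [foldl_allowed_mul]
    rw [allowedCount_foldl]
    simp [pow_succ, mul_comm]

-- L2: skipping state counts all shorter lengths
lemma dfsV_free_skip (d : Int) (t : List Int) :
    dfsV d t false false
      = (PySem.List.pyRange 1 ((t.length : Int) + 1) 1).foldl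
          (fun a L => a + allowedCount 1 10 d * allowedCount 0 10 d ^ (L - 1).toNat) 0 := by
  induction t with
  | nil =>
    rw [PySem.List.pyRange_one_eq_nil (by norm_num)]
    simp [dfsV]
  | cons v t ih =>
    have hlen : ((v :: t).length : Int) + 1 = ((t.length : Int) + 1) + 1 := by
      simp only [List.length_cons]; omega
    rw [hlen, PySem.List.pyRange_one_succ_right (by omega), List.foldl_append]
    simp only [dfsV, Bool.false_and, Bool.false_eq_true, if_false, dfsV_free_num, ih]
    rw [foldl_allowed_mul, allowedCount_foldl]
    simp only [List.foldl_cons, List.foldl_nil]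
    have h2 : (((t.length : Int) + 1) - 1).toNat = t.length := by omega
    rw [h2]
    norm_num

-- L3: the tight branch equals B's scan (positions after the first)
lemma dfsV_limit_scan (d : Int) (t : List Int) (i m : Nat)
    (hm : i + t.length = m) (hi : i ≠ 0) (hd : ∀ v ∈ t, 0 ≤ v) :
    dfsV d t true true = scanB d (allowedCount 0 10 d) m i t := by
  induction t generalizing i with
  | nil => simp [dfsV, scanB]
  | cons v t ih =>
    have hv : (0 : Int) ≤ v := hd v (by simp)
    have hml : m - 1 - i = t.length := by
      simp only [List.length_cons] at hm; omega
    simp only [dfsV, scanB, Bool.true_and, if_true, if_neg hi, hml]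
    rw [PySem.List.pyRange_one_succ_right hv, List.foldl_append]
    have hfirst : (PySem.List.pyRange 0 v 1).foldl
        (fun acc x => if x ≠ d then
            acc + (if decide (x = v) = true then dfsV d t true true else dfsV d t false true)
          else acc) 0
        = allowedCount 0 v d * allowedCount 0 10 d ^ t.length := by
      rw [PySem.List.foldl_congr_mem (PySem.List.pyRange 0 v 1)
        (fun (acc x : Int) => if x ≠ d then
            acc + (if decide (x = v) = true then dfsV d t true true else dfsV d t false true)
          else acc)
        (fun (acc x : Int) => if x ≠ d then acc + allowedCount 0 10 d ^ t.length else acc) 0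
        (by
          intro acc x hx
          have hxv : x < v := (PySem.List.mem_pyRange_one.mp hx).2
          have hdec : decide (x = v) = false := by simp; omega
          simp only [hdec, Bool.false_eq_true, if_false, dfsV_free_num])]
      rw [foldl_allowed_mul, allowedCount_foldl, zero_add]
    rw [hfirst]
    simp only [List.foldl_cons, List.foldl_nil, decide_eq_true_eq]
    by_cases hvd : v = d
    · simp [hvd]
    · simp only [ne_eq, hvd, not_false_iff]
      rw [ih (i + 1) (by simp only [List.length_cons] at hm; omega) (by omega)
        (fun w hw => hd w (List.mem_cons_of_mem _ hw))]
      simp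

-- ===== VERDICT (by name: the statement is the Claim_ definition above) =====
theorem count_digit_base2_spec : Claim_equal_count_digit_base2 := by
  intro num d _ hpre
  unfold Pre_count_digit_base2 at hpre
  unfold Spec_count_digit_base2 count_digit_base2 count_digit_base2_alt
  rw [PySem.Int.toList_toStr]
  by_cases h0 : num ≤ 0
  · have hz : num = 0 := le_antisymm h0 hpre
    subst hz
    rw [if_pos le_rfl]
    have hch : PySem.Int.toChars 0 = ['0'] := rfl
    rw [hch]
    have hp0 : pyDigit '0' = 0 := by decide
    have hr : PySem.List.pyRange 1 ((0 : Int) + 1) 1 = [] := rfl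
    simp only [dfsA, hp0, Bool.false_eq_true, if_false, if_true, hr, List.foldl_nil]
  · rw [if_neg h0]
    obtain ⟨n, rfl⟩ : ∃ n : Nat, num = (n : Int) := ⟨num.toNat, (Int.toNat_of_nonneg hpre).symm⟩
    have hn : 1 ≤ n := by omega
    rw [dfsA_eq_dfsV, toChars_eq n]
    have hmap : ((msdigits n).map Nat.digitChar).map pyDigit
        = (msdigits n).map (fun e : Nat => (e : Int)) := by
      rw [List.map_map]
      refine List.map_congr_left fun e he => ?_
      simpa using pyDigit_digitChar e (msdigits_lt n e he)
    rw [hmap]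
    obtain ⟨e, t, het, he⟩ := msdigits_head n hn
    rw [het]
    simp only [List.map_cons]
    have he1 : (1 : Int) ≤ (e : Nat) := by exact_mod_cast he
    -- LHS: expand one level of dfsV
    simp only [dfsV, Bool.true_and, Bool.false_eq_true, if_false, if_true]
    rw [PySem.List.pyRange_one_succ_right he1, List.foldl_append]
    have hfirst : ∀ init : Int, (PySem.List.pyRange 1 (e : Int) 1).foldl
        (fun acc x => if x ≠ d then
            acc + (if decide (x = (e : Int)) = true then dfsV d (t.map (fun e : Nat => (e : Int))) true true
              else dfsV d (t.map (fun e : Nat => (e : Int))) false true)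
          else acc) init
        = init + allowedCount 1 (e : Int) d * allowedCount 0 10 d ^ t.length := by
      intro init
      rw [PySem.List.foldl_congr_mem (PySem.List.pyRange 1 (e : Int) 1)
        (fun (acc x : Int) => if x ≠ d then
            acc + (if decide (x = (e : Int)) = true then dfsV d (t.map (fun e : Nat => (e : Int))) true true
              else dfsV d (t.map (fun e : Nat => (e : Int))) false true)
          else acc)
        (fun (acc x : Int) => if x ≠ d then acc + allowedCount 0 10 d ^ t.length else acc) init
        (by
          intro acc x hx
          have hxv : x < (e : Int) := (PySem.List.mem_pyRange_one.mp hx).2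
          have hdec : decide (x = (e : Int)) = false := by simp; omega
          simp only [hdec, Bool.false_eq_true, if_false, dfsV_free_num, List.length_map])]
      rw [foldl_allowed_mul, allowedCount_foldl]
    rw [hfirst]
    rw [dfsV_free_skip]
    have hscan : dfsV d (t.map (fun e : Nat => (e : Int))) true true
        = scanB d (allowedCount 0 10 d) ((t.map (fun e : Nat => (e : Int))).length + 1) 1 (t.map (fun e : Nat => (e : Int))) := by
      exact dfsV_limit_scan d _ 1 _ (by omega) one_ne_zero
        (by intro w hw; obtain ⟨a, _, rfl⟩ := List.mem_map.mp hw; positivity)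
    -- RHS: expand scanB at i = 0
    simp only [scanB, List.length_cons, List.length_map]
    have hm0 : t.length + 1 - 1 - 0 = t.length := by omega
    have hcast : ((t.length + 1 : Nat) : Int) = ((t.length : Nat) : Int) + 1 := by push_cast; ring
    rw [hm0, hcast]
    simp only [List.foldl_cons, List.foldl_nil, decide_true, List.length_map] at *
    by_cases hed : (e : Int) = d
    · norm_num [hed]
    · norm_num [hed, hscan]
      ring
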